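-- pv_equiv track=rewrite | github.com/SunOner/sunone_aimbot | logic/arduino.py | _split_value
-- ===== SOURCE A (Python) =====
-- def _split_value(value):
--     if value == 0:
--         return [0]
--
--     values = []
--     sign = -1 if value < 0 else 1
--
--     while abs(value) > 127:
--         values.append(sign * 127)
--         value -= sign * 127
--
--     values.append(value)
--
--     return values
-- ===== SOURCE B (Python) =====
-- def _split_value(value):
--     if value == 0:
--         return [0]
--     sign = -1 if value < 0 else 1
--     n = (abs(value) - 1) // 127
--     return [sign * 127] * n + [value - sign * 127 * n]
-- ===== Notes on version B (the rewrite author's own statement) =====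
-- stated objective: simpler
-- what changed: Replaces the subtract-and-test while loop by a closed-form chunk count ((abs(value)-1) floor-divided by the chunk size) and a one-shot list construction of the repeated chunks plus remainder.
import Mathlib
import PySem

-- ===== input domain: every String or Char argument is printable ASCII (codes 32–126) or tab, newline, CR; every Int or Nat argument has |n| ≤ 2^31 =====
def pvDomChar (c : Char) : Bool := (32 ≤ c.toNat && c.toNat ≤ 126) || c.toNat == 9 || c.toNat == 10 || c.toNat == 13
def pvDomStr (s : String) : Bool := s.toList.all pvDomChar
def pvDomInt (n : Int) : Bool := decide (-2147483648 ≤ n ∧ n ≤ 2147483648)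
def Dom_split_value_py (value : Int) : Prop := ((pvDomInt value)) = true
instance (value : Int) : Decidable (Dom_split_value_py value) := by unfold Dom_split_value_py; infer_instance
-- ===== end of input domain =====

-- B replaces A's subtract-and-test while loop by a closed-form chunk count and a
-- one-shot list construction (objective: simpler).

-- ===== PORT A =====
-- the while loop of A; fuel bounds the iteration count (each step lowers |value| by 127,
-- so |value|.natAbs steps always suffice; fuel-0 branch is unreachable)
def splitLoopA : Nat → Int → Int → List Int → List Int
  | 0, _, value, values => values ++ [value]
  | fuel + 1, sign, value, values =>
    if 127 < |value| then
      splitLoopA fuel sign (value - sign * 127) (values ++ [sign * 127])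
    else
      values ++ [value]

def split_value_py (value : Int) : List Int :=
  if value = 0 then [0]
  else
    let sign : Int := if value < 0 then -1 else 1
    splitLoopA value.natAbs sign value []

-- ===== PORT B =====
def split_value_py_alt (value : Int) : List Int :=
  if value = 0 then [0]
  else
    let sign : Int := if value < 0 then -1 else 1
    let n : Int := PySem.Int.floordiv (|value| - 1) 127
    List.replicate n.toNat (sign * 127) ++ [value - sign * 127 * n]

-- ===== PRECONDITION & SPEC =====
def Spec_split_value_py (value : Int) (out : List Int) : Prop := out = split_value_py_alt value
instance (value : Int) (out : List Int) : Decidable (Spec_split_value_py value out) := by unfold Spec_split_value_py; infer_instance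

-- ===== CLAIM (what is proved, stated in full; the proofs are below) =====
def Claim_equal_split_value_py : Prop := ∀ (value : Int), Dom_split_value_py value → Spec_split_value_py value (split_value_py value)

-- ===== LEMMAS AND PROOFS =====

-- the loop unfolds to the closed form, by induction on the chunk count k
lemma splitLoopA_closed (k : Nat) : ∀ (fuel : Nat) (sign value : Int) (values : List Int),
    ((0 < value ∧ sign = 1) ∨ (value < 0 ∧ sign = -1)) →
    127 * k ≤ |value| - 1 → |value| - 1 < 127 * (k + 1) → k ≤ fuel →
    splitLoopA fuel sign value values
      = values ++ List.replicate k (sign * 127) ++ [value - sign * 127 * k] := by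
  induction k with
  | zero =>
    intro fuel sign value values hs h1 h2 _
    have hle : ¬ 127 < |value| := by omega
    cases fuel with
    | zero => simp [splitLoopA]
    | succ f => simp [splitLoopA, hle]
  | succ k ih =>
    intro fuel sign value values hs h1 h2 hf
    have hgt : 127 < |value| := by omega
    cases fuel with
    | zero => omega
    | succ f =>
      have habs : |value - sign * 127| = |value| - 127 := by
        rcases hs with ⟨hv, rfl⟩ | ⟨hv, rfl⟩
        · rw [abs_of_pos hv] at hgt ⊢
          rw [abs_of_pos (by omega)]; omega
        · rw [abs_of_neg hv] at hgt ⊢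
          rw [abs_of_neg (by omega)]; omega
      have hs' : (0 < value - sign * 127 ∧ sign = 1) ∨ (value - sign * 127 < 0 ∧ sign = -1) := by
        rcases hs with ⟨hv, rfl⟩ | ⟨hv, rfl⟩ <;> [left; right] <;>
          constructor <;> first | rfl | (rw [abs_of_pos hv] at hgt; omega) | (rw [abs_of_neg hv] at hgt; omega)
      rw [splitLoopA, if_pos hgt,
        ih f sign (value - sign * 127) (values ++ [sign * 127]) hs'
          (by omega) (by omega) (by omega)]
      simp [List.replicate_succ, List.append_assoc]
      ring_nf

theorem split_value_py_spec : Claim_equal_split_value_py := by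
  intro value _
  unfold Spec_split_value_py split_value_py split_value_py_alt
  by_cases h0 : value = 0
  · simp [h0]
  · simp only [h0, if_false]
    set sign : Int := if value < 0 then -1 else 1 with hsign
    have habs1 : (1:Int) ≤ |value| := by
      rcases lt_trichotomy value 0 with h | h | h
      · rw [abs_of_neg h]; omega
      · exact absurd h h0
      · rw [abs_of_pos h]; omega
    set n : Int := PySem.Int.floordiv (|value| - 1) 127 with hn
    have hfd : n = (|value| - 1) / 127 := by
      rw [hn, PySem.Int.floordiv_eq_ediv_of_pos (by norm_num)]
    have hnn : 0 ≤ n := by rw [hfd]; omega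
    have h1 : 127 * n ≤ |value| - 1 := by rw [hfd]; omega
    have h2 : |value| - 1 < 127 * (n + 1) := by rw [hfd]; omega
    have hk : (n.toNat : Int) = n := Int.toNat_of_nonneg hnn
    have hfuel : n.toNat ≤ value.natAbs := by
      have : (value.natAbs : Int) = |value| := Int.abs_eq_natAbs value ▸ rfl
      omega
    have hs : (0 < value ∧ sign = 1) ∨ (value < 0 ∧ sign = -1) := by
      rcases lt_trichotomy value 0 with h | h | h
      · right; exact ⟨h, by rw [hsign, if_pos h]⟩
      · exact absurd h h0
      · left; exact ⟨h, by rw [hsign, if_neg (by omega)]⟩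
    have := splitLoopA_closed n.toNat value.natAbs sign value [] hs
      (by rw [hk]; exact h1) (by rw [hk]; omega) hfuel
    rw [this, hk]
    simp

-- ===== VERDICT (by name: the statement is the Claim_ definition above) =====
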